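-- pv_equiv track=rewrite | github.com/Jiawei-Wang/LeetCode-Study | 2733. Neither Minimum nor Maximum.py | findNonMinOrMax
-- ===== SOURCE A (Python) =====
-- from typing import List
--
-- def findNonMinOrMax(nums: List[int]) -> int:
--     big = None
--     smo = None
--
--     # every num is a unique one between 1 <= num <= 100
--     for num in nums:
--         if big == None and smo == None:
--             big = num
--         elif smo == None:
--             smo, big = min(big, num), max(big, num)
--         else:
--             if num > big:
--                 return big
--             elif num > smo:
--                 return num
--             else:
--                 return smo
--
--     return -1
-- ===== SOURCE B (Python) =====
-- def findNonMinOrMax(nums):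
--     if len(nums) < 3:
--         return -1
--     return sorted(nums[:3])[1]
-- ===== Notes on version B (the rewrite author's own statement) =====
-- stated objective: simpler
-- what changed: Replaces A's incremental min/max state machine and three-way branch with a guard on len(nums) < 3 plus sort-the-first-three-and-take-the-middle.
import Mathlib
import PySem

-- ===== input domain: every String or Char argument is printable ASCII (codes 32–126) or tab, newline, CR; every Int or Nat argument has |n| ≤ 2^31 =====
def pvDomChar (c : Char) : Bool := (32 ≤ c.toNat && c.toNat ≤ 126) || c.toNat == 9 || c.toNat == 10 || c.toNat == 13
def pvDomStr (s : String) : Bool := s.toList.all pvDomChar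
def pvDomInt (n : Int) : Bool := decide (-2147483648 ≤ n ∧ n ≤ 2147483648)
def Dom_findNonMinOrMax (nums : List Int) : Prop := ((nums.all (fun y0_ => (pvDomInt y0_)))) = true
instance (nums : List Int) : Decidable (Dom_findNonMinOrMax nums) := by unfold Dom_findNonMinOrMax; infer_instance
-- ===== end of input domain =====

-- ===== PORT A =====
-- B replaces A's incremental min/max state machine with sort-first-three-take-middle (objective: simpler).
-- Loop state big, smo as in A (None -> Option.none). The (none, some _) state is unreachable
-- (A never produces it; Python would raise comparing int with None there); ported as -1 arbitrarily.
def findNonMinOrMaxGo : List Int → Option Int → Option Int → Int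
  | [], _, _ => -1
  | num :: rest, big, smo =>
    match big, smo with
    | none, none => findNonMinOrMaxGo rest (some num) smo
    | some b, none => findNonMinOrMaxGo rest (some (max b num)) (some (min b num))
    | some b, some s =>
      if num > b then b
      else if num > s then num
      else s
    | none, some _ => -1

def findNonMinOrMax (nums : List Int) : Int :=
  findNonMinOrMaxGo nums none none

-- ===== PORT B =====
def findNonMinOrMax_alt (nums : List Int) : Int :=
  if nums.length < 3 then -1
  else (PySem.List.pyGet? (PySem.List.sorted (PySem.List.slice nums none (some 3)) (fun x => x) false) 1).getD 0

-- ===== PRECONDITION & SPEC =====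
def Spec_findNonMinOrMax (nums : List Int) (out : Int) : Prop := out = findNonMinOrMax_alt nums
instance (nums : List Int) (out : Int) : Decidable (Spec_findNonMinOrMax nums out) := by unfold Spec_findNonMinOrMax; infer_instance

-- ===== CLAIM (what is proved, stated in full; the proofs are below) =====
def Claim_equal_findNonMinOrMax : Prop := ∀ (nums : List Int), Dom_findNonMinOrMax nums → Spec_findNonMinOrMax nums (findNonMinOrMax nums)

-- ===== LEMMAS AND PROOFS =====

-- sorted(xs)[1] named: if [x,y,z] is an ordered rearrangement of [a,b,c], the picked element is y.
lemma med3 (a b c x y z : Int) (hp : List.Perm [x, y, z] [a, b, c])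
    (h1 : x ≤ y) (h2 : y ≤ z) :
    (PySem.List.pyGet? (PySem.List.sorted [a, b, c] (fun x => x) false) 1).getD 0 = y := by
  rw [PySem.List.sorted_id_eq_of_perm_of_pairwise _ _ hp
      (by simp [List.pairwise_cons]; omega)]
  simp [PySem.List.pyGet?, PySem.List.pyIdx?]

-- A's three-way branch on the third element equals the median of the first three.
lemma branch_eq_median (a b c : Int) :
    findNonMinOrMaxGo [c] (some (max a b)) (some (min a b)) =
      (PySem.List.pyGet? (PySem.List.sorted [a, b, c] (fun x => x) false) 1).getD 0 := by
  show (if c > max a b then max a b else if c > min a b then c else min a b) = _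
  rcases le_total a b with hab | hab <;> rcases le_total b c with hbc | hbc <;>
    rcases le_total a c with hac | hac
  · rw [med3 a b c a b c (List.Perm.refl _) hab hbc]
    simp [max_def, min_def]; split_ifs <;> omega
  · rw [med3 a b c a b c (List.Perm.refl _) hab hbc]
    simp [max_def, min_def]; split_ifs <;> omega
  · rw [med3 a b c a c b ((List.Perm.swap b c []).cons a) hac hbc]
    simp [max_def, min_def]; split_ifs <;> omega
  · rw [med3 a b c c a b ((List.Perm.swap a c [b]).trans ((List.Perm.swap b c []).cons a)) hac hab]
    simp [max_def, min_def]; split_ifs <;> omega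
  · rw [med3 a b c b a c (List.Perm.swap a b [c]) hab hac]
    simp [max_def, min_def]; split_ifs <;> omega
  · rw [med3 a b c b c a (((List.Perm.swap a c []).cons b).trans (List.Perm.swap a b [c])) hbc hac]
    simp [max_def, min_def]; split_ifs <;> omega
  · rw [med3 a b c c b a ((List.Perm.swap b c [a]).trans
        (((List.Perm.swap a c []).cons b).trans (List.Perm.swap a b [c]))) hbc hab]
    simp [max_def, min_def]; split_ifs <;> omega
  · rw [med3 a b c c b a ((List.Perm.swap b c [a]).trans
        (((List.Perm.swap a c []).cons b).trans (List.Perm.swap a b [c]))) hbc hab]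
    simp [max_def, min_def]; split_ifs <;> omega

-- ===== VERDICT (by name: the statement is the Claim_ definition above) =====
theorem findNonMinOrMax_spec : Claim_equal_findNonMinOrMax := by
  intro nums _
  unfold Spec_findNonMinOrMax
  match nums with
  | [] => rfl
  | [a] => rfl
  | [a, b] => rfl
  | a :: b :: c :: rest =>
    have hs : PySem.List.slice (a :: b :: c :: rest) none (some 3) = [a, b, c] := by
      have := PySem.List.slice_to_natCast (a :: b :: c :: rest) 3
      simpa using this
    have hb : findNonMinOrMax (a :: b :: c :: rest) =
        findNonMinOrMaxGo [c] (some (max a b)) (some (min a b)) := rfl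
    have hlen : ¬ (a :: b :: c :: rest).length < 3 := by simp
    rw [hb, branch_eq_median a b c, findNonMinOrMax_alt, if_neg hlen, hs]
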